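-- pv_equiv track=rewrite | github.com/jamesdgalbraith/DDE_Pipeline | scripts/conserved_check.py | end_gap_counter
-- ===== SOURCE A (Python) =====
-- def end_gap_counter(seq):
--   end_count=0
--   for i, aa in enumerate(seq):
--     if(aa == '-'):
--       end_count+=1
--     else:
--       break
--   return(end_count)
-- ===== SOURCE B (Python) =====
-- def end_gap_counter(seq):
--   return len(seq) - len(seq.lstrip('-'))
-- ===== Notes on version B (the rewrite author's own statement) =====
-- stated objective: idiomatic
-- what changed: Replaces the explicit enumerate/counter/break scan with a closed form over strings: len(seq) - len(seq.lstrip('-')).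
import Mathlib
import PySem

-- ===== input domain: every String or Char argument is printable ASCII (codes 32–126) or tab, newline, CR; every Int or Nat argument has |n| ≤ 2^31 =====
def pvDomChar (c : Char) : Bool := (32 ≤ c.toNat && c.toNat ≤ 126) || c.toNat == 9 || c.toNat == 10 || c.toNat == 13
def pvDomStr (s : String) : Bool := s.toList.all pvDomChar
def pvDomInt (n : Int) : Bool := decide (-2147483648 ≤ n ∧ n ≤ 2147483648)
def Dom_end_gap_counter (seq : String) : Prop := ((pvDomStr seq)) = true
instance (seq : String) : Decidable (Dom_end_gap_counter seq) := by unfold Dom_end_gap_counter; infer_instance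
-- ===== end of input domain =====

-- B replaces A's explicit counter/break scan by the closed form len(seq) - len(seq.lstrip('-')).

-- ===== PORT A =====
-- the 'for … break' loop: count while the char is '-', stop at the first other char
def endGapLoop : List Char → Int → Int
  | [], c => c
  | aa :: rest, c => if aa = '-' then endGapLoop rest (c + 1) else c

def end_gap_counter (seq : String) : Int := endGapLoop seq.toList 0

-- ===== PORT B =====
-- seq.lstrip('-') ported by hand as dropWhile (exact: lstrip with one char drops exactly the leading copies of it)
def end_gap_counter_alt (seq : String) : Int :=
  (seq.toList.length : Int) - ((seq.toList.dropWhile (· == '-')).length : Int)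

-- ===== PRECONDITION & SPEC =====
def Spec_end_gap_counter (seq : String) (out : Int) : Prop := out = end_gap_counter_alt seq
instance (seq : String) (out : Int) : Decidable (Spec_end_gap_counter seq out) := by unfold Spec_end_gap_counter; infer_instance

-- ===== CLAIM (what is proved, stated in full; the proofs are below) =====
def Claim_equal_end_gap_counter : Prop := ∀ (seq : String), Dom_end_gap_counter seq → Spec_end_gap_counter seq (end_gap_counter seq)

-- ===== LEMMAS AND PROOFS =====
theorem endGapLoop_eq (l : List Char) (c : Int) :
    endGapLoop l c = c + ((l.length : Int) - ((l.dropWhile (· == '-')).length : Int)) := by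
  induction l generalizing c with
  | nil => simp [endGapLoop]
  | cons aa rest ih =>
    by_cases h : aa = '-'
    · simp [endGapLoop, h, List.dropWhile, ih]
      have hle : (rest.dropWhile (· == '-')).length ≤ rest.length := List.length_dropWhile_le _ _
      omega
    · simp [endGapLoop, h, List.dropWhile, beq_false_of_ne h]

-- ===== VERDICT (by name: the statement is the Claim_ definition above) =====
theorem end_gap_counter_spec : Claim_equal_end_gap_counter := by
  intro seq _
  unfold Spec_end_gap_counter end_gap_counter end_gap_counter_alt
  rw [endGapLoop_eq]
  ring
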